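-- pv_equiv track=rewrite | github.com/vedantgaur/reference-model-eval | existing-eval/alpaca-eval/old_ca_ref_corr.py | find_partial_match
-- ===== SOURCE A (Python) =====
-- def find_partial_match(alpaca_models, arena_models):
--     matches = {}
--     for alpaca_model in alpaca_models:
--         best_match = None
--         best_match_length = 0
--         for arena_model in arena_models:
--             if alpaca_model in arena_model or arena_model in alpaca_model:
--                 if len(arena_model) > best_match_length:
--                     best_match = arena_model
--                     best_match_length = len(arena_model)
--         if best_match:
--             matches[alpaca_model] = best_match
--     return matches
-- ===== SOURCE B (Python) =====
-- def find_partial_match(alpaca_models, arena_models):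
--     # Sort arena models once by length descending (stable), then take the
--     # first containing/contained match instead of tracking a running maximum.
--     ordered = sorted(arena_models, key=len, reverse=True)
--     matches = {}
--     for alpaca_model in alpaca_models:
--         best = next((m for m in ordered
--                      if alpaca_model in m or m in alpaca_model), "")
--         if best:
--             matches[alpaca_model] = best
--     return matches
-- ===== Notes on version B (the rewrite author's own statement) =====
-- stated objective: faster
-- what changed: Replaces the per-alpaca running maximum over all arena models with one stable length-descending sort of arena_models followed by a first-match scan that stops at the first hit.
import Mathlib
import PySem

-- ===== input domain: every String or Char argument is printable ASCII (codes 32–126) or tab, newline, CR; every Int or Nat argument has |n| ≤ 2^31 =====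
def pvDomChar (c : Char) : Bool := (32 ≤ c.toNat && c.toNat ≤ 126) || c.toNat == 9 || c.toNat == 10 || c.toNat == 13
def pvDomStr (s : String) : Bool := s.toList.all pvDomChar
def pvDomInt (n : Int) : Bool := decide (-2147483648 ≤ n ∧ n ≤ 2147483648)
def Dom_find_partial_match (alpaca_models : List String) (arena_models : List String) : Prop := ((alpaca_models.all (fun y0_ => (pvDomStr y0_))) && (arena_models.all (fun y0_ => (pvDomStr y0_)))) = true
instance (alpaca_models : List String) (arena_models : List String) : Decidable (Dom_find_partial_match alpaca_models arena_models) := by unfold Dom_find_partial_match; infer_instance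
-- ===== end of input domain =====

-- B replaces A's per-alpaca running maximum with one stable length-descending
-- sort of arena_models plus a first-match scan (alternative decomposition; same results).

-- ===== PORT A =====
-- 'alpaca_model in arena_model or arena_model in alpaca_model'
def fpmPred (alpaca_model : String) (arena_model : String) : Bool :=
  PySem.Str.isIn alpaca_model arena_model || PySem.Str.isIn arena_model alpaca_model

-- A's inner-loop body: state = (best_match, best_match_length)
def fpmStep (alpaca_model : String) (st : Option String × Int) (arena_model : String) :
    Option String × Int :=
  if fpmPred alpaca_model arena_model then
    if st.2 < PySem.Str.len arena_model then (some arena_model, PySem.Str.len arena_model)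
    else st
  else st

-- A's outer-loop body
def fpmBody (arena_models : List String) (d : PySem.Dict String String)
    (alpaca_model : String) : PySem.Dict String String :=
  let best := arena_models.foldl (fpmStep alpaca_model) (none, 0)
  match best.1 with
  | some best_match =>          -- 'if best_match:' (None and "" are falsy)
      if best_match == "" then d else d.insert alpaca_model best_match
  | none => d

def find_partial_match (alpaca_models : List String) (arena_models : List String) : List (String × String) :=
  (alpaca_models.foldl (fpmBody arena_models) PySem.Dict.empty).items

-- ===== PORT B =====
-- 'next((m for m in ordered if alpaca_model in m or m in alpaca_model), "")'
def fpmHit (ordered : List String) (alpaca_model : String) : String :=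
  (ordered.find? (fpmPred alpaca_model)).getD ""

-- B's loop body
def fpmBodyAlt (ordered : List String) (d : PySem.Dict String String)
    (alpaca_model : String) : PySem.Dict String String :=
  let best := fpmHit ordered alpaca_model
  if best == "" then d else d.insert alpaca_model best

def find_partial_match_alt (alpaca_models : List String) (arena_models : List String) : List (String × String) :=
  let ordered := PySem.List.sorted arena_models PySem.Str.len true
  (alpaca_models.foldl (fpmBodyAlt ordered) PySem.Dict.empty).items

-- ===== PRECONDITION & SPEC =====
def Spec_find_partial_match (alpaca_models : List String) (arena_models : List String) (out : List (String × String)) : Prop := out = find_partial_match_alt alpaca_models arena_models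
instance (alpaca_models : List String) (arena_models : List String) (out : List (String × String)) : Decidable (Spec_find_partial_match alpaca_models arena_models out) := by unfold Spec_find_partial_match; infer_instance

-- ===== CLAIM (what is proved, stated in full; the proofs are below) =====
def Claim_equal_find_partial_match : Prop := ∀ (alpaca_models : List String) (arena_models : List String), Dom_find_partial_match alpaca_models arena_models → Spec_find_partial_match alpaca_models arena_models (find_partial_match alpaca_models arena_models)

-- ===== LEMMAS AND PROOFS =====

-- find? through insertBy when the inserted element does not satisfy p
theorem find?_insertBy_neg {α : Type} (before : α → α → Bool) (p : α → Bool) (x : α)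
    (acc : List α) (hx : p x = false) :
    (PySem.List.insertBy before x acc).find? p = acc.find? p := by
  induction acc with
  | nil => simp [PySem.List.insertBy, List.find?, hx]
  | cons y ys ih =>
    simp only [PySem.List.insertBy]
    split
    · simp [List.find?, hx]
    · cases hy : p y <;> simp [List.find?, hy, ih]

-- find? through insertBy into a length-descending list when the inserted element satisfies p
theorem find?_insertBy_pos {α κ : Type} [LinearOrder κ] (key : α → κ) (p : α → Bool) (x : α)
    (acc : List α) (hs : acc.Pairwise (fun a b => key b ≤ key a)) (hx : p x = true) :
    (PySem.List.insertBy (fun a b => decide (key b < key a)) x acc).find? p =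
      match acc.find? p with
      | some m => if key m < key x then some x else some m
      | none => some x := by
  induction acc with
  | nil => simp [PySem.List.insertBy, List.find?, hx]
  | cons y ys ih =>
    rcases List.pairwise_cons.1 hs with ⟨hy_le, hys⟩
    simp only [PySem.List.insertBy]
    by_cases hlt : key y < key x
    · rw [if_pos (by simp [hlt])]
      cases hy : p y with
      | true =>
        simp [List.find?, hx, hy, hlt]
      | false =>
        simp only [List.find?, hx, hy]
        cases hm : ys.find? p with
        | none => simp
        | some m =>
          have hmem := List.mem_of_find?_eq_some hm
          have : key m < key x := lt_of_le_of_lt (hy_le m hmem) hlt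
          simp [this]
    · rw [if_neg (by simp [hlt])]
      cases hy : p y with
      | true => simp [List.find?, hy, not_lt_of_ge (not_lt.1 hlt)]
      | false =>
        simp only [List.find?, hy]
        rw [ih hys]

theorem find?_insertBy_pos_none {α κ : Type} [LinearOrder κ] (key : α → κ) (p : α → Bool) (x : α)
    (acc : List α) (hs : acc.Pairwise (fun a b => key b ≤ key a)) (hx : p x = true)
    (hm : acc.find? p = none) :
    (PySem.List.insertBy (fun a b => decide (key b < key a)) x acc).find? p = some x := by
  rw [find?_insertBy_pos key p x acc hs hx, hm]

theorem find?_insertBy_pos_some {α κ : Type} [LinearOrder κ] (key : α → κ) (p : α → Bool) (x : α)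
    (acc : List α) (m : α) (hs : acc.Pairwise (fun a b => key b ≤ key a)) (hx : p x = true)
    (hm : acc.find? p = some m) :
    (PySem.List.insertBy (fun a b => decide (key b < key a)) x acc).find? p =
      if key m < key x then some x else some m := by
  rw [find?_insertBy_pos key p x acc hs hx, hm]

-- the inner loop of A characterised against find? on B's sorted list
theorem loopA_char (a : String) (arena : List String) :
    (arena.foldl (fpmStep a) (none, 0)).2 =
        (match (arena.foldl (fpmStep a) (none, 0)).1 with
         | some b => PySem.Str.len b | none => 0) ∧
    (∀ b, (arena.foldl (fpmStep a) (none, 0)).1 = some b → 0 < PySem.Str.len b) ∧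
    ((arena.foldl (fpmStep a) (none, 0)).1 =
      match (PySem.List.sorted arena PySem.Str.len true).find? (fpmPred a) with
      | some m => if PySem.Str.len m ≤ 0 then none else some m
      | none => none) := by
  induction arena using List.reverseRecOn with
  | nil => simp [PySem.List.sorted]
  | append_singleton l x ih =>
    obtain ⟨ih2, ihpos, ih1⟩ := ih
    have hsort : PySem.List.sorted (l ++ [x]) PySem.Str.len true =
        PySem.List.insertBy (fun a b => decide (PySem.Str.len b < PySem.Str.len a)) x
          (PySem.List.sorted l PySem.Str.len true) := by
      rw [PySem.List.sorted_rev_eq_foldl_insertBy, PySem.List.sorted_rev_eq_foldl_insertBy,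
        List.foldl_append]
      rfl
    rw [List.foldl_append, hsort]
    have hxlen : (0:Int) ≤ PySem.Str.len x := by
      rw [PySem.Str.len_eq]; exact Int.natCast_nonneg _
    cases hp : fpmPred a x with
    | false =>
      rw [find?_insertBy_neg _ _ _ _ hp]
      simp only [List.foldl_cons, List.foldl_nil, fpmStep, hp]
      exact ⟨ih2, ihpos, ih1⟩
    | true =>
      simp only [List.foldl_cons, List.foldl_nil, fpmStep, hp, if_true]
      cases hm : (PySem.List.sorted l PySem.Str.len true).find? (fpmPred a) with
      | none =>
        rw [find?_insertBy_pos_none PySem.Str.len (fpmPred a) x _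
          (PySem.List.sorted_pairwise_rev l PySem.Str.len) hp hm]
        -- no previous match: state was (none, 0)
        have hst1 : (l.foldl (fpmStep a) (none, 0)).1 = none := by rw [ih1, hm]
        have hst2 : (l.foldl (fpmStep a) (none, 0)).2 = 0 := by rw [ih2, hst1]
        by_cases hx0 : PySem.Str.len x ≤ 0
        · rw [if_neg (by omega)]
          refine ⟨ih2, ihpos, ?_⟩
          rw [hst1]
          show (none : Option String) = if PySem.Str.len x ≤ 0 then none else some x
          rw [if_pos hx0]
        · rw [if_pos (by omega)]
          refine ⟨rfl, ?_, ?_⟩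
          · intro b hb; cases hb; omega
          · show some x = if PySem.Str.len x ≤ 0 then none else some x
            rw [if_neg hx0]
      | some m =>
        rw [find?_insertBy_pos_some PySem.Str.len (fpmPred a) x _ m
          (PySem.List.sorted_pairwise_rev l PySem.Str.len) hp hm]
        have hmlen : (0:Int) ≤ PySem.Str.len m := by
          rw [PySem.Str.len_eq]; exact Int.natCast_nonneg _
        by_cases hm0 : PySem.Str.len m ≤ 0
        · -- previous best was falsy (the empty string): state was (none, 0)
          have hst1 : (l.foldl (fpmStep a) (none, 0)).1 = none := by
            rw [ih1, hm]; exact if_pos hm0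
          have hst2 : (l.foldl (fpmStep a) (none, 0)).2 = 0 := by rw [ih2, hst1]
          by_cases hx0 : PySem.Str.len x ≤ 0
          · rw [if_neg (by omega), if_neg (by omega)]
            refine ⟨ih2, ihpos, ?_⟩
            rw [hst1]
            show (none : Option String) = if PySem.Str.len m ≤ 0 then none else some m
            rw [if_pos hm0]
          · rw [if_pos (by omega), if_pos (by omega)]
            refine ⟨rfl, ?_, ?_⟩
            · intro b hb; cases hb; omega
            · show some x = if PySem.Str.len x ≤ 0 then none else some x
              rw [if_neg hx0]
        · -- previous best was m itself
          have hst1 : (l.foldl (fpmStep a) (none, 0)).1 = some m := by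
            rw [ih1, hm]; exact if_neg hm0
          have hst2 : (l.foldl (fpmStep a) (none, 0)).2 = PySem.Str.len m := by rw [ih2, hst1]
          by_cases hlt : PySem.Str.len m < PySem.Str.len x
          · rw [if_pos (by omega), if_pos hlt]
            refine ⟨rfl, ?_, ?_⟩
            · intro b hb; cases hb; omega
            · show some x = if PySem.Str.len x ≤ 0 then none else some x
              rw [if_neg (by omega)]
          · rw [if_neg (by omega), if_neg hlt]
            refine ⟨ih2, ihpos, ?_⟩
            rw [hst1]
            show some m = if PySem.Str.len m ≤ 0 then none else some m
            rw [if_neg hm0]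

-- Str.len s = 0 exactly for the empty string
theorem len_le_zero_iff (s : String) : PySem.Str.len s ≤ 0 ↔ s = "" := by
  rw [PySem.Str.len_eq]
  constructor
  · intro h
    have : s.toList.length = 0 := by omega
    exact String.toList_eq_nil_iff.mp (List.length_eq_zero_iff.1 this)
  · intro h; subst h; simp

-- the two per-alpaca dict updates coincide
theorem action_eq (arena : List String) (d : PySem.Dict String String) (a : String) :
    fpmBody arena d a = fpmBodyAlt (PySem.List.sorted arena PySem.Str.len true) d a := by
  obtain ⟨-, hpos, h1⟩ := loopA_char a arena
  simp only [fpmBody, fpmBodyAlt, fpmHit]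
  cases hm : (PySem.List.sorted arena PySem.Str.len true).find? (fpmPred a) with
  | none =>
    rw [h1, hm]
    simp
  | some m =>
    rw [h1, hm]
    by_cases hm0 : PySem.Str.len m ≤ 0
    · have : m = "" := (len_le_zero_iff m).1 hm0
      subst this
      simp
    · have hne : m ≠ "" := fun h => hm0 ((len_le_zero_iff m).2 h)
      simp [Option.getD, hne]

-- ===== VERDICT (by name: the statement is the Claim_ definition above) =====
theorem find_partial_match_spec : Claim_equal_find_partial_match := by
  intro alpaca arena _
  unfold Spec_find_partial_match find_partial_match find_partial_match_alt
  congr 1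
  have H : ∀ (l : List String) (d : PySem.Dict String String),
      l.foldl (fpmBody arena) d =
      l.foldl (fpmBodyAlt (PySem.List.sorted arena PySem.Str.len true)) d := by
    intro l
    induction l with
    | nil => intro d; rfl
    | cons a t ih =>
      intro d
      simp only [List.foldl_cons, action_eq, ih]
  exact H alpaca PySem.Dict.empty
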